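-- pv_equiv track=rewrite | github.com/stranske/Trend_Model_Project | src/trend_analysis/config/patch.py | _has_invalid_json_pointer_escape
-- ===== SOURCE A (Python) =====
-- def _has_invalid_json_pointer_escape(path: str) -> bool:
--     for segment in path.split("/")[1:]:
--         index = 0
--         while index < len(segment):
--             if segment[index] != "~":
--                 index += 1
--                 continue
--             if index + 1 >= len(segment) or segment[index + 1] not in {"0", "1"}:
--                 return True
--             index += 2
--     return False
-- ===== SOURCE B (Python) =====
-- def _has_invalid_json_pointer_escape(path: str) -> bool:
--     # Everything before the first "/" is ignored (A drops split("/")[0]);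
--     # "/" separators never look like "0"/"1", so the remainder can be scanned
--     # as one string: a "~" is invalid iff its immediate successor is not "0"/"1"
--     # (a "~" as the last character has no successor and is invalid).
--     rest = path.partition("/")[2]
--     return rest.endswith("~") or any(
--         a == "~" and b not in ("0", "1") for a, b in zip(rest, rest[1:])
--     )
-- ===== Notes on version B (the rewrite author's own statement) =====
-- stated objective: simpler
-- what changed: Replaces the per-segment index-stepping while-loop (skip 2 after a valid escape) by taking everything after the first '/' and doing one adjacent-pair scan: a '~' is invalid iff its successor is not '0'/'1' (or it is the last character).
import Mathlib
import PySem

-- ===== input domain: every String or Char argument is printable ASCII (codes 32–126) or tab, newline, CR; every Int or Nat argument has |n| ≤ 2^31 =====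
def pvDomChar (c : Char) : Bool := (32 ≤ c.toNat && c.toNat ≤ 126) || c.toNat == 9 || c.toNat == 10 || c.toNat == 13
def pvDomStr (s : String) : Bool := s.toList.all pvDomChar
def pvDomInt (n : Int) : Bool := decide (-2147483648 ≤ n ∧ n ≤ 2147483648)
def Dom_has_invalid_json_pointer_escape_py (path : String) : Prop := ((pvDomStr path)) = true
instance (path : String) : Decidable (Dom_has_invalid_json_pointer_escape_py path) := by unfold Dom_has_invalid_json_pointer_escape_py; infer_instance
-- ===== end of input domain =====

-- B replaces A's per-segment index-stepping while-loop by a single adjacent-pair scan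
-- of everything after the first "/" (objective: simpler).

-- ===== PORT A =====
-- the inner `while index < len(segment): …` loop, index-stepping exactly as A does
def pvWhileA (seg : List Char) (index : Nat) : Bool :=
  if h : index < seg.length then
    if seg[index] ≠ '~' then
      pvWhileA seg (index + 1)
    else if seg.length ≤ index + 1 then true
    else if ¬ (seg[index + 1]! = '0' ∨ seg[index + 1]! = '1') then true
    else pvWhileA seg (index + 2)
  else false
termination_by seg.length - index
decreasing_by all_goals omega

-- the outer `for segment in …:` loop with its early `return True`
def pvForA : List (List Char) → Bool
  | [] => false
  | seg :: rest => if pvWhileA seg 0 then true else pvForA rest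

def has_invalid_json_pointer_escape_py (path : String) : Bool :=
  pvForA (PySem.List.slice (PySem.Chars.splitOn path.toList ['/']) (some 1))

-- ===== PORT B =====
-- path.partition("/")[2] : the characters after the first "/" ("" when there is none);
-- exact hand port of str.partition's third component for the one-char separator "/"
def pvAfterSlash : List Char → List Char
  | [] => []
  | c :: t => if c = '/' then t else pvAfterSlash t

def has_invalid_json_pointer_escape_py_alt (path : String) : Bool :=
  let rest := pvAfterSlash path.toList
  -- rest.endswith("~") or any(a == "~" and b not in ("0","1") for a, b in zip(rest, rest[1:]))
  PySem.Chars.endswith rest ['~'] ||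
    (rest.zip rest.tail).any (fun p => p.1 == '~' && !(p.2 == '0' || p.2 == '1'))

-- ===== PRECONDITION & SPEC =====
def Spec_has_invalid_json_pointer_escape_py (path : String) (out : Bool) : Prop := out = has_invalid_json_pointer_escape_py_alt path
instance (path : String) (out : Bool) : Decidable (Spec_has_invalid_json_pointer_escape_py path out) := by unfold Spec_has_invalid_json_pointer_escape_py; infer_instance

-- ===== CLAIM (what is proved, stated in full; the proofs are below) =====
def Claim_equal_has_invalid_json_pointer_escape_py : Prop := ∀ (path : String), Dom_has_invalid_json_pointer_escape_py path → Spec_has_invalid_json_pointer_escape_py path (has_invalid_json_pointer_escape_py path)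

-- ===== LEMMAS AND PROOFS =====

-- clean structural recursion equal to PySem.Chars.splitOn on a one-char separator
def pvSplitChar (s : Char) : List Char → List (List Char)
  | [] => [[]]
  | c :: t =>
    if c = s then [] :: pvSplitChar s t
    else
      match pvSplitChar s t with
      | [] => [[c]]
      | p :: ps => (c :: p) :: ps

-- "the next character is not a valid escape continuation"
def pvHeadBad : List Char → Bool
  | [] => true
  | d :: _ => !(d == '0' || d == '1')

-- "some '~' is followed by a bad continuation"
def pvTbad : List Char → Bool
  | [] => false
  | c :: t => (c == '~' && pvHeadBad t) || pvTbad t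

theorem pvSplitChar_ne_nil (s : Char) (l : List Char) : pvSplitChar s l ≠ [] := by
  cases l with
  | nil => simp [pvSplitChar]
  | cons c t =>
    simp only [pvSplitChar]
    split
    · simp
    · split
      · simp
      · simp

theorem pvSplitOn_go_eq (s : Char) (l cur : List Char) (acc : List (List Char)) (fuel : Nat)
    (h : l.length < fuel) :
    PySem.Chars.splitOn.go [s] fuel l cur acc =
      acc.reverse ++ List.modifyHead (fun p => cur.reverse ++ p) (pvSplitChar s l) := by
  induction l generalizing cur acc fuel with
  | nil =>
    cases fuel with
    | zero => omega
    | succ n => simp [PySem.Chars.splitOn.go, pvSplitChar]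
  | cons c t ih =>
    cases fuel with
    | zero => omega
    | succ n =>
      simp only [List.length_cons] at h
      by_cases hc : c = s
      · subst hc
        have hpre : List.isPrefixOf [c] (c :: t) = true := by
          simp [List.isPrefixOf]
        have hlen1 : List.drop [c].length (c :: t) = t := by simp
        simp only [PySem.Chars.splitOn.go, hpre, if_true, hlen1]
        rw [ih [] (cur.reverse :: acc) n (by omega)]
        cases hsp : pvSplitChar c t with
        | nil => exact absurd hsp (pvSplitChar_ne_nil c t)
        | cons p ps => simp [pvSplitChar, hsp]
      · have hpre : List.isPrefixOf [s] (c :: t) = false := by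
          simp [List.isPrefixOf]
          intro h'; exact absurd h'.symm hc
        simp only [PySem.Chars.splitOn.go, hpre]
        rw [if_neg (by simp), ih (c :: cur) acc n (by omega)]
        simp only [pvSplitChar, if_neg hc]
        cases hsp : pvSplitChar s t with
        | nil => exact absurd hsp (pvSplitChar_ne_nil s t)
        | cons p ps => simp

theorem pvSplitOn_eq (s : Char) (l : List Char) :
    PySem.Chars.splitOn l [s] = pvSplitChar s l := by
  have := pvSplitOn_go_eq s l [] [] (l.length + 1) (by omega)
  cases hsp : pvSplitChar s l with
  | nil => exact absurd hsp (pvSplitChar_ne_nil s l)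
  | cons p ps => simpa [PySem.Chars.splitOn, hsp] using this

-- the head segment of pvSplitChar has the same "bad continuation" verdict as the whole list
theorem pvHeadBad_splitChar (t : List Char) :
    pvHeadBad ((pvSplitChar '/' t).headD []) = pvHeadBad t := by
  cases t with
  | nil => simp [pvSplitChar, pvHeadBad]
  | cons d t' =>
    simp only [pvSplitChar]
    by_cases hd : d = '/'
    · subst hd; simp [pvHeadBad]
    · rw [if_neg hd]
      cases hsp : pvSplitChar '/' t' with
      | nil => exact absurd hsp (pvSplitChar_ne_nil '/' t')
      | cons p ps => simp [pvHeadBad]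

-- the tail of the split is the split of everything after the first '/'
theorem pvSplitChar_tail (l : List Char) :
    (pvSplitChar '/' l).tail =
      if '/' ∈ l then pvSplitChar '/' (pvAfterSlash l) else [] := by
  induction l with
  | nil => simp [pvSplitChar]
  | cons c t ih =>
    simp only [pvSplitChar, pvAfterSlash]
    by_cases hc : c = '/'
    · subst hc; simp
    · rw [if_neg hc, if_neg hc]
      cases hsp : pvSplitChar '/' t with
      | nil => exact absurd hsp (pvSplitChar_ne_nil '/' t)
      | cons p ps =>
        rw [hsp] at ih
        simp only [List.tail_cons] at ih ⊢
        have hiff : ('/' = c ∨ '/' ∈ t) ↔ '/' ∈ t :=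
          ⟨fun h => h.elim (fun h => absurd h.symm hc) id, Or.inr⟩
        simp only [List.mem_cons, hiff, ih]

-- A's while loop from index i sees exactly the dropped suffix
theorem pvWhileA_eq_Tbad (seg : List Char) (i : Nat) :
    pvWhileA seg i = pvTbad (seg.drop i) := by
  induction hfuel : seg.length - i using Nat.strong_induction_on generalizing i with
  | _ n ih =>
    rw [pvWhileA]
    by_cases h : i < seg.length
    · rw [dif_pos h]
      have hdrop : seg.drop i = seg[i] :: seg.drop (i + 1) := List.drop_eq_getElem_cons h
      by_cases hne : seg[i] ≠ '~'
      · rw [if_pos hne, ih (seg.length - (i+1)) (by omega) (i+1) rfl, hdrop]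
        have hb : (seg[i] == '~') = false := beq_eq_false_iff_ne.mpr hne
        simp [pvTbad, hb]
      · push_neg at hne
        rw [if_neg (by simp [hne])]
        by_cases hlen : seg.length ≤ i + 1
        · rw [if_pos hlen]
          have : seg.drop (i + 1) = [] := List.drop_eq_nil_of_le hlen
          simp [hdrop, this, pvTbad, pvHeadBad, hne]
        · rw [if_neg hlen]
          push_neg at hlen
          have hdrop2 : seg.drop (i + 1) = seg[i+1] :: seg.drop (i + 2) :=
            List.drop_eq_getElem_cons hlen
          have hget : seg[i+1]! = seg[i+1] := getElem!_pos seg (i+1) hlen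
          by_cases hgood : seg[i+1] = '0' ∨ seg[i+1] = '1'
          · rw [if_neg (by simp [hget, hgood]),
              ih (seg.length - (i+2)) (by omega) (i+2) rfl]
            have hd1 : (seg[i+1] == '~') = false := by
              rcases hgood with h0 | h0 <;> simp [h0]
            have hg : (!(seg[i+1] == '0' || seg[i+1] == '1')) = false := by
              rcases hgood with h0 | h0 <;> simp [h0]
            rw [hdrop, hdrop2]
            simp only [pvTbad, pvHeadBad]
            simp [hd1, hg]
          · rw [if_pos (by simp [hget]; tauto)]
            have : pvHeadBad (seg.drop (i+1)) = true := by
              rw [hdrop2]; push_neg at hgood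
              simp [pvHeadBad, hgood.1, hgood.2]
            rw [hdrop]
            simp only [pvTbad]
            simp [hne, this]
    · rw [dif_neg h]
      have : seg.drop i = [] := List.drop_eq_nil_of_le (by omega)
      simp [this, pvTbad]

-- the segment loop over the split equals the single-pass predicate on the unsplit list
theorem pvForA_splitChar (l : List Char) :
    pvForA (pvSplitChar '/' l) = pvTbad l := by
  induction l with
  | nil => simp [pvSplitChar, pvForA, pvWhileA_eq_Tbad, pvTbad]
  | cons c t ih =>
    simp only [pvSplitChar]
    by_cases hc : c = '/'
    · subst hc
      rw [if_pos rfl]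
      have h0 : pvWhileA [] 0 = false := by rw [pvWhileA_eq_Tbad]; rfl
      simp [pvForA, h0, ih, pvTbad]
    · rw [if_neg hc]
      cases hsp : pvSplitChar '/' t with
      | nil => exact absurd hsp (pvSplitChar_ne_nil '/' t)
      | cons p ps =>
        rw [hsp] at ih
        have hhead := pvHeadBad_splitChar t
        rw [hsp] at hhead
        simp only [List.headD_cons] at hhead
        have e1 : pvForA ((c :: p) :: ps) = (pvTbad (c :: p) || pvForA ps) := by
          simp only [pvForA, pvWhileA_eq_Tbad, List.drop_zero]
          cases pvTbad (c :: p) <;> simp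
        have e2 : pvForA (p :: ps) = (pvTbad p || pvForA ps) := by
          simp only [pvForA, pvWhileA_eq_Tbad, List.drop_zero]
          cases pvTbad p <;> simp
        rw [e2] at ih
        rw [e1]
        simp only [pvTbad, hhead]
        rw [← ih, Bool.or_assoc]

-- a one-character suffix test is a test on the last character
theorem pvEnds1 (c : Char) : (['~'] : List Char).isSuffixOf [c] = (c == '~') := by
  by_cases h : c = '~'
  · subst h; decide
  · have h1 : (c == '~') = false := beq_eq_false_iff_ne.mpr h
    rw [h1, Bool.eq_false_iff]
    intro hx
    rw [List.isSuffixOf_iff_suffix, List.suffix_cons_iff] at hx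
    rcases hx with hx | hx
    · exact h (List.head_eq_of_cons_eq hx.symm)
    · simp at hx

-- B's pairwise scan equals the single-pass predicate
theorem pvZip_eq_Tbad (l : List Char) :
    (PySem.Chars.endswith l ['~'] ||
      (l.zip l.tail).any (fun p => p.1 == '~' && !(p.2 == '0' || p.2 == '1'))) = pvTbad l := by
  induction l with
  | nil => decide
  | cons c t ih =>
    cases t with
    | nil =>
      simp [PySem.Chars.endswith, pvEnds1, pvTbad, pvHeadBad]
    | cons d t' =>
      have hend : PySem.Chars.endswith (c :: d :: t') ['~'] =
          PySem.Chars.endswith (d :: t') ['~'] := by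
        have hiff : ((['~'] : List Char) <:+ c :: d :: t') ↔ (['~'] <:+ d :: t') := by
          rw [List.suffix_cons_iff]
          constructor
          · intro h
            rcases h with h | h
            · exfalso; simp at h
            · exact h
          · exact Or.inr
        show (['~'] : List Char).isSuffixOf (c :: d :: t') = (['~'] : List Char).isSuffixOf (d :: t')
        rw [Bool.eq_iff_iff]
        simp only [List.isSuffixOf_iff_suffix]
        exact hiff
      have hR : pvTbad (c :: d :: t') =
          ((c == '~' && !(d == '0' || d == '1')) || pvTbad (d :: t')) := rfl
      simp only [List.tail_cons, List.zip_cons_cons, List.any_cons] at ih ⊢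
      rw [hend, hR, ← ih, Bool.or_left_comm]

-- when the list has no '/', the for-loop body runs on no segments and nothing after a '/' exists
theorem pvMain (l : List Char) :
    pvForA ((pvSplitChar '/' l).tail) =
      (PySem.Chars.endswith (pvAfterSlash l) ['~'] ||
        ((pvAfterSlash l).zip (pvAfterSlash l).tail).any
          (fun p => p.1 == '~' && !(p.2 == '0' || p.2 == '1'))) := by
  rw [pvZip_eq_Tbad, pvSplitChar_tail]
  by_cases h : '/' ∈ l
  · rw [if_pos h, pvForA_splitChar]
  · rw [if_neg h]
    have : pvAfterSlash l = [] := by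
      induction l with
      | nil => simp [pvAfterSlash]
      | cons c t ih =>
        simp only [List.mem_cons, not_or] at h
        have hc : ¬ c = '/' := fun hc => h.1 hc.symm
        simp only [pvAfterSlash, if_neg hc]
        exact ih h.2
    simp [this, pvForA, pvTbad]

-- ===== VERDICT (by name: the statement is the Claim_ definition above) =====
theorem has_invalid_json_pointer_escape_py_spec : Claim_equal_has_invalid_json_pointer_escape_py := by
  intro path _
  unfold Spec_has_invalid_json_pointer_escape_py
  unfold has_invalid_json_pointer_escape_py has_invalid_json_pointer_escape_py_alt
  rw [pvSplitOn_eq, PySem.List.slice_from _ (by norm_num)]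
  have : (List.drop (Int.toNat 1) (pvSplitChar '/' path.toList)) =
      (pvSplitChar '/' path.toList).tail := by
    simp [List.drop_one]
  rw [this, pvMain]
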